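-- pv_equiv track=rewrite | github.com/skochv04/algorithms-and-data-structures | BeforeExam 1 - Graphs/2 lakes.py | lakes
-- ===== SOURCE A (Python) =====
-- def dfs(T, visited, row, col, size):
--     if row < 0 or row >= len(T) or col < 0 or col >= len(T) or T[row][col] == "L" or visited[row][col]:
--         return size
--
--     size += 1
--     visited[row][col] = True
--     actual_size = size
--     actual_size = dfs(T, visited, row - 1, col, actual_size)
--     actual_size = dfs(T, visited, row, col - 1, actual_size)
--     actual_size = dfs(T, visited, row, col + 1, actual_size)
--     actual_size = dfs(T, visited, row + 1, col, actual_size)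
--     return actual_size
--
-- def lakes(T):
--     n = len(T)
--     visited = [[False for _ in range(n)] for _ in range(n)]
--     count = max_lake = 0
--     for i in range(len(T)):
--         for j in range(len(T)):
--             if T[i][j] == "W" and not visited[i][j]:
--                 count += 1
--                 max_lake = max(dfs(T, visited, i, j, 0), max_lake)
--     return count, max_lake
-- ===== SOURCE B (Python) =====
-- def flood(T, seen, i, j):
--     n = len(T)
--     size = 0
--     stack = [(i, j)]
--     while stack:
--         r, c = stack.pop()
--         if 0 <= r < n and 0 <= c < n and T[r][c] != "L" and not seen[r][c]:
--             seen[r][c] = True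
--             size += 1
--             stack += [(r + 1, c), (r, c + 1), (r, c - 1), (r - 1, c)]
--     return size
--
-- def lakes(T):
--     n = len(T)
--     seen = [[False] * n for _ in range(n)]
--     sizes = [flood(T, seen, i, j)
--              for i in range(n) for j in range(n)
--              if T[i][j] == "W" and not seen[i][j]]
--     return len(sizes), max(sizes, default=0)
-- ===== Notes on version B (the rewrite author's own statement) =====
-- stated objective: alternative
-- what changed: A's recursive flood-fill with running count/max accumulators is replaced by a staged design: an iterative explicit-stack flood (pop, test in-bounds/not-'L'/unseen positively, mark and push neighbours) collects one size per component into a list, and the answer is (len(sizes), max(sizes, default=0)) computed afterwards, removing both the recursion-depth limit and the interleaved accumulator updates.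
import Mathlib
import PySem

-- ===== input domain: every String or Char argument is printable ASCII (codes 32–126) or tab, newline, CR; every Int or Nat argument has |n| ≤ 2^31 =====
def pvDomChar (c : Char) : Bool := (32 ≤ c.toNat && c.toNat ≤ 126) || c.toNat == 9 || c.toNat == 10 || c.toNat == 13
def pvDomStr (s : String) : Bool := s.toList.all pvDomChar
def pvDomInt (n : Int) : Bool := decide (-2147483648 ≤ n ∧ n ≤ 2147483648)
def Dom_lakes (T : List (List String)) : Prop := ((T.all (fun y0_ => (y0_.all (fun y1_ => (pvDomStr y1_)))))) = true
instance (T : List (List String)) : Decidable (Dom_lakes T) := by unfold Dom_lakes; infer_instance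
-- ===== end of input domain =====

-- B replaces A's recursive flood-fill with running count/max accumulators by a staged design:
-- an iterative explicit-stack flood collects one size per component into a list, and the
-- answer is (len(sizes), max(sizes, default=0)); objective: alternative.
-- Both loops carry a fuel guard that only makes them total; the fuel supplied in
-- lakes/lakes_alt always exceeds the real recursion depth / iteration count (proved below).

-- ===== PORT A =====
-- the guard A's dfs tests on an entered cell
def badCell (T : List (List String)) (v : List (List Bool)) (row col : Int) : Bool :=
  decide (row < 0 ∨ (T.length : Int) ≤ row ∨ col < 0 ∨ (T.length : Int) ≤ col ∨
    ((T.getD row.toNat []).getD col.toNat "") = "L" ∨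
    ((v.getD row.toNat []).getD col.toNat false) = true)

-- A's fuel bound: unvisited-cell count
def countFalse (v : List (List Bool)) : Nat :=
  (v.map (fun row => row.countP (fun b => !b))).sum

-- visited[row][col] = True
def markV (v : List (List Bool)) (r c : Nat) : List (List Bool) :=
  v.set r ((v.getD r []).set c true)

-- A's recursive dfs; each level marks one cell, so recursion depth ≤ countFalse v + 1 = the fuel
def dfsA (T : List (List String)) (fuel : Nat) (v : List (List Bool))
    (row col size : Int) : List (List Bool) × Int :=
  match fuel with
  | 0 => (v, size)
  | f + 1 =>
    if badCell T v row col then (v, size)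
    else
      let v1 := markV v row.toNat col.toNat
      let r1 := dfsA T f v1 (row - 1) col (size + 1)
      let r2 := dfsA T f r1.1 row (col - 1) r1.2
      let r3 := dfsA T f r2.1 row (col + 1) r2.2
      dfsA T f r3.1 (row + 1) col r3.2

def lakesStepA (T : List (List String)) (st : List (List Bool) × Int × Int) (i j : Nat) :
    List (List Bool) × Int × Int :=
  if ((T.getD i []).getD j "") = "W" ∧ ((st.1.getD i []).getD j false) = false then
    let d := dfsA T (countFalse st.1 + 1) st.1 ((i : Nat) : Int) ((j : Nat) : Int) 0
    (d.1, st.2.1 + 1, max d.2 st.2.2)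
  else st

def lakes (T : List (List String)) : Int × Int :=
  let n := T.length
  let fin := (List.range n).foldl
    (fun st i => (List.range n).foldl (fun st j => lakesStepA T st i j) st)
    (List.replicate n (List.replicate n false), 0, 0)
  (fin.2.1, fin.2.2)

-- ===== PORT B =====
-- seen[r][c] = True (B's marking, written with modify)
def seeMark (v : List (List Bool)) (r c : Nat) : List (List Bool) :=
  v.modify r (fun row => row.modify c (fun _ => true))

-- B's fuel bound: number of unseen cells (a totality device only; Source B needs none)
def unseenCount (v : List (List Bool)) : Nat :=
  v.foldl (fun a row => a + (row.filter (fun b => !b)).length) 0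

-- B's while loop: head of the list is the top of the Python stack; a popped cell is processed
-- only if the positive guard (in bounds, not "L", unseen) holds, else dropped
def floodB (T : List (List String)) (fuel : Nat) (seen : List (List Bool))
    (stack : List (Int × Int)) (size : Int) : List (List Bool) × Int :=
  match fuel, stack with
  | _, [] => (seen, size)
  | 0, _ => (seen, size)
  | f + 1, (r, c) :: rest =>
    if 0 ≤ r ∧ r < (T.length : Int) ∧ 0 ≤ c ∧ c < (T.length : Int) ∧
        ((T.getD r.toNat []).getD c.toNat "") ≠ "L" ∧
        ((seen.getD r.toNat []).getD c.toNat false) = false then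
      floodB T f (seeMark seen r.toNat c.toNat)
        ((r - 1, c) :: (r, c - 1) :: (r, c + 1) :: (r + 1, c) :: rest) (size + 1)
    else floodB T f seen rest size

-- staged: first the list of component sizes (the comprehension), then len and max(…, default=0)
def lakes_alt (T : List (List String)) : Int × Int :=
  let n := T.length
  let res := (List.range n).foldl
    (fun st i => (List.range n).foldl
      (fun st j =>
        if ((T.getD i []).getD j "") = "W" ∧ ¬ ((st.1.getD i []).getD j false) = true then
          let d := floodB T (4 * unseenCount st.1 + 2) st.1 [(((i : Nat) : Int), ((j : Nat) : Int))] 0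
          (d.1, st.2 ++ [d.2])
        else st) st)
    (List.replicate n (List.replicate n false), ([] : List Int))
  ((res.2.length : Int), PySem.List.maxD res.2 (fun x => x) 0)

-- ===== PRECONDITION & SPEC =====
-- Pre_ excludes exactly the grids in which some row is shorter than len(T): there A's
-- scan of T[i][j] raises IndexError (B raises identically).
def Pre_lakes (T : List (List String)) : Prop := ∀ rw ∈ T, T.length ≤ rw.length
instance (T : List (List String)) : Decidable (Pre_lakes T) := by unfold Pre_lakes; infer_instance
def pvWitness_lakes : List (List String) := [["W", "L"], ["W", "W"]]
def Spec_lakes (T : List (List String)) (out : Int × Int) : Prop := out = lakes_alt T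
instance (T : List (List String)) (out : Int × Int) : Decidable (Spec_lakes T out) := by unfold Spec_lakes; infer_instance

-- ===== CLAIM (what is proved, stated in full; the proofs are below) =====
def Claim_equal_lakes : Prop := ∀ (T : List (List String)), Dom_lakes T → Pre_lakes T → Spec_lakes T (lakes T)

-- ===== LEMMAS AND PROOFS =====

-- B's marking equals A's (modify vs set)
theorem modify_const_true (row : List Bool) (c : Nat) :
    row.modify c (fun _ => true) = row.set c true := by
  induction row generalizing c with
  | nil => simp [List.modify_nil]
  | cons a t ih =>
    cases c with
    | zero => simp [List.modify_zero_cons]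
    | succ c => simp [List.modify_succ_cons, ih]

theorem seeMark_eq_markV (v : List (List Bool)) (r c : Nat) :
    seeMark v r c = markV v r c := by
  induction v generalizing r with
  | nil => simp [seeMark, markV, List.modify_nil]
  | cons row t ih =>
    cases r with
    | zero => simp [seeMark, markV, List.modify_zero_cons, modify_const_true, List.getD]
    | succ r =>
      have := ih r
      simp [seeMark, markV, List.modify_succ_cons, List.getD] at this ⊢
      exact this

-- B's fuel bound equals A's
theorem unseenCount_aux (v : List (List Bool)) :
    ∀ a : Nat, v.foldl (fun a row => a + (row.filter (fun b => !b)).length) a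
      = a + countFalse v := by
  induction v with
  | nil => intro a; simp [countFalse]
  | cons row t ih =>
    intro a
    simp only [List.foldl_cons, ih, countFalse, List.map_cons, List.sum_cons,
      List.countP_eq_length_filter]
    omega

theorem unseenCount_eq (v : List (List Bool)) : unseenCount v = countFalse v := by
  simpa using unseenCount_aux v 0

-- B's positive guard is the negation of A's
theorem good_iff (T : List (List String)) (v : List (List Bool)) (r c : Int) :
    (0 ≤ r ∧ r < (T.length : Int) ∧ 0 ≤ c ∧ c < (T.length : Int) ∧
        ((T.getD r.toNat []).getD c.toNat "") ≠ "L" ∧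
        ((v.getD r.toNat []).getD c.toNat false) = false)
      ↔ ¬ badCell T v r c = true := by
  simp only [badCell, decide_eq_true_eq]
  push_neg
  constructor
  · rintro ⟨h1, h2, h3, h4, h5, h6⟩
    exact ⟨by omega, by omega, by omega, by omega, h5, by simpa using h6⟩
  · rintro ⟨h1, h2, h3, h4, h5, h6⟩
    exact ⟨by omega, by omega, by omega, by omega, h5, by simpa using h6⟩

-- the visited matrix stays n × n (n = len(T)); the proofs thread this invariant
def InvV (T : List (List String)) (v : List (List Bool)) : Prop :=
  v.length = T.length ∧ ∀ rw ∈ v, rw.length = T.length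

theorem countP_set_true_lt (row : List Bool) (c : Nat)
    (hc : c < row.length) (hf : row.getD c false = false) :
    (row.set c true).countP (fun b => !b) < row.countP (fun b => !b) := by
  induction row generalizing c with
  | nil => simp at hc
  | cons a t ih =>
    cases c with
    | zero =>
      simp [List.getD] at hf
      subst hf
      simp [List.countP_cons]
    | succ c =>
      have hc' : c < t.length := by simpa using hc
      have hf' : t.getD c false = false := by simpa [List.getD] using hf
      have := ih c hc' hf'
      simp only [List.set_cons_succ, List.countP_cons]
      omega

theorem countFalse_mark_lt (v : List (List Bool)) (r c : Nat)
    (hr : r < v.length) (hc : c < (v.getD r []).length)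
    (hf : (v.getD r []).getD c false = false) :
    countFalse (markV v r c) < countFalse v := by
  induction v generalizing r with
  | nil => simp at hr
  | cons row t ih =>
    cases r with
    | zero =>
      simp [List.getD] at hc hf
      have := countP_set_true_lt row c hc hf
      simp [markV, countFalse, List.getD]
      omega
    | succ r =>
      have hr' : r < t.length := by simpa using hr
      have hc' : c < (t.getD r []).length := by simpa [List.getD] using hc
      have hf' : (t.getD r []).getD c false = false := by simpa [List.getD] using hf
      have := ih r hr' hc' hf'
      simp only [markV, countFalse, List.getD_cons_succ, List.set_cons_succ,
        List.map_cons, List.sum_cons] at this ⊢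
      omega

theorem invV_mark (T : List (List String)) (v : List (List Bool)) (r c : Nat)
    (hv : InvV T v) : InvV T (markV v r c) := by
  obtain ⟨h1, h2⟩ := hv
  by_cases hr : r < v.length
  · refine ⟨by simp [markV, h1], ?_⟩
    intro rw hrw
    rcases List.mem_or_eq_of_mem_set hrw with h | h
    · exact h2 _ h
    · subst h
      rw [List.length_set, List.getD_eq_getElem v [] hr]
      exact h2 _ (List.getElem_mem hr)
  · have : markV v r c = v := List.set_eq_of_length_le (by omega)
    rw [this]; exact ⟨h1, h2⟩

theorem good_mark_lt (T : List (List String)) (v : List (List Bool)) (row col : Int)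
    (hv : InvV T v) (h : ¬ badCell T v row col = true) :
    countFalse (markV v row.toNat col.toNat) < countFalse v := by
  simp only [badCell, decide_eq_true_eq] at h
  push_neg at h
  obtain ⟨h1, h2, h3, h4, _, h6⟩ := h
  have hr : row.toNat < v.length := by rw [hv.1]; omega
  apply countFalse_mark_lt v row.toNat col.toNat hr
  · rw [List.getD_eq_getElem v [] hr, hv.2 _ (List.getElem_mem hr)]
    omega
  · simpa using h6

theorem invV_init (T : List (List String)) :
    InvV T (List.replicate T.length (List.replicate T.length false)) :=
  ⟨by simp, by intro rw h; rw [List.eq_of_mem_replicate h]; simp⟩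

-- dfsA keeps the invariant and never increases the unvisited count
theorem dfsA_inv (T : List (List String)) (f : Nat) :
    ∀ (v : List (List Bool)) (row col size : Int), InvV T v →
      InvV T (dfsA T f v row col size).1 ∧
        countFalse (dfsA T f v row col size).1 ≤ countFalse v := by
  induction f with
  | zero => intro v row col size hv; rw [dfsA]; exact ⟨hv, le_refl _⟩
  | succ f ih =>
    intro v row col size hv
    rw [dfsA]
    by_cases h : badCell T v row col = true
    · rw [if_pos h]; exact ⟨hv, le_refl _⟩
    · simp only [if_neg h]
      have hm := good_mark_lt T v row col hv h
      have hv1 := invV_mark T v row.toNat col.toNat hv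
      obtain ⟨i1, l1⟩ := ih (markV v row.toNat col.toNat) (row - 1) col (size + 1) hv1
      obtain ⟨i2, l2⟩ := ih (dfsA T f (markV v row.toNat col.toNat) (row - 1) col (size + 1)).1
        row (col - 1) (dfsA T f (markV v row.toNat col.toNat) (row - 1) col (size + 1)).2 i1
      obtain ⟨i3, l3⟩ := ih _ row (col + 1) _ i2
      obtain ⟨i4, l4⟩ := ih _ (row + 1) col _ i3
      exact ⟨i4, by omega⟩

-- any two sufficient fuels give the same dfsA result
theorem dfsA_fuel (T : List (List String)) : ∀ (f f' : Nat) (v : List (List Bool))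
    (row col size : Int), InvV T v → countFalse v < f → countFalse v < f' →
    dfsA T f v row col size = dfsA T f' v row col size := by
  intro f
  induction f with
  | zero => intro f' v row col size hv hf hf'; omega
  | succ f ih =>
    intro f' v row col size hv hf hf'
    cases f' with
    | zero => omega
    | succ f' =>
      rw [dfsA, dfsA]
      by_cases h : badCell T v row col = true
      · rw [if_pos h, if_pos h]
      · simp only [if_neg h]
        have hm := good_mark_lt T v row col hv h
        have hv1 := invV_mark T v row.toNat col.toNat hv
        rw [ih f' (markV v row.toNat col.toNat) (row - 1) col (size + 1) hv1
          (by omega) (by omega)]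
        obtain ⟨i1, l1⟩ := dfsA_inv T f' (markV v row.toNat col.toNat) (row - 1) col
          (size + 1) hv1
        rw [ih f' (dfsA T f' (markV v row.toNat col.toNat) (row - 1) col (size + 1)).1
          row (col - 1)
          (dfsA T f' (markV v row.toNat col.toNat) (row - 1) col (size + 1)).2 i1
          (by omega) (by omega)]
        obtain ⟨i2, l2⟩ := dfsA_inv T f'
          (dfsA T f' (markV v row.toNat col.toNat) (row - 1) col (size + 1)).1
          row (col - 1)
          (dfsA T f' (markV v row.toNat col.toNat) (row - 1) col (size + 1)).2 i1
        rw [ih f' _ row (col + 1) _ i2 (by omega) (by omega)]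
        obtain ⟨i3, l3⟩ := dfsA_inv T f' _ row (col + 1) _ i2
        rw [ih f' _ (row + 1) col _ i3 (by omega) (by omega)]

-- the dfs size accumulator never decreases
theorem dfsA_size_le (T : List (List String)) (f : Nat) :
    ∀ (v : List (List Bool)) (row col size : Int), size ≤ (dfsA T f v row col size).2 := by
  induction f with
  | zero => intro v row col size; rw [dfsA]
  | succ f ih =>
    intro v row col size
    rw [dfsA]
    by_cases h : badCell T v row col = true
    · rw [if_pos h]
    · simp only [if_neg h]
      have t1 := ih (markV v row.toNat col.toNat) (row - 1) col (size + 1)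
      have t2 := ih (dfsA T f (markV v row.toNat col.toNat) (row - 1) col (size + 1)).1
        row (col - 1) (dfsA T f (markV v row.toNat col.toNat) (row - 1) col (size + 1)).2
      have t3 := ih (dfsA T f (dfsA T f (markV v row.toNat col.toNat) (row - 1) col
          (size + 1)).1 row (col - 1)
          (dfsA T f (markV v row.toNat col.toNat) (row - 1) col (size + 1)).2).1
        row (col + 1)
        (dfsA T f (dfsA T f (markV v row.toNat col.toNat) (row - 1) col (size + 1)).1
          row (col - 1)
          (dfsA T f (markV v row.toNat col.toNat) (row - 1) col (size + 1)).2).2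
      have t4 := ih (dfsA T f (dfsA T f (dfsA T f (markV v row.toNat col.toNat) (row - 1)
          col (size + 1)).1 row (col - 1)
          (dfsA T f (markV v row.toNat col.toNat) (row - 1) col (size + 1)).2).1
          row (col + 1)
          (dfsA T f (dfsA T f (markV v row.toNat col.toNat) (row - 1) col (size + 1)).1
            row (col - 1)
            (dfsA T f (markV v row.toNat col.toNat) (row - 1) col (size + 1)).2).2).1
        (row + 1) col
        (dfsA T f (dfsA T f (dfsA T f (markV v row.toNat col.toNat) (row - 1) col
          (size + 1)).1 row (col - 1)
          (dfsA T f (markV v row.toNat col.toNat) (row - 1) col (size + 1)).2).1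
          row (col + 1)
          (dfsA T f (dfsA T f (markV v row.toNat col.toNat) (row - 1) col (size + 1)).1
            row (col - 1)
            (dfsA T f (markV v row.toNat col.toNat) (row - 1) col (size + 1)).2).2).2
      omega

-- a good start cell yields a component size ≥ 1
theorem dfsA_good_one (T : List (List String)) (f : Nat) (v : List (List Bool))
    (row col : Int) (h : ¬ badCell T v row col = true) :
    1 ≤ (dfsA T (f + 1) v row col 0).2 := by
  rw [dfsA]
  simp only [if_neg h]
  have t1 := dfsA_size_le T f (markV v row.toNat col.toNat) (row - 1) col (0 + 1)
  have t2 := dfsA_size_le T f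
    (dfsA T f (markV v row.toNat col.toNat) (row - 1) col (0 + 1)).1 row (col - 1)
    (dfsA T f (markV v row.toNat col.toNat) (row - 1) col (0 + 1)).2
  have t3 := dfsA_size_le T f
    (dfsA T f (dfsA T f (markV v row.toNat col.toNat) (row - 1) col (0 + 1)).1 row
      (col - 1) (dfsA T f (markV v row.toNat col.toNat) (row - 1) col (0 + 1)).2).1
    row (col + 1)
    (dfsA T f (dfsA T f (markV v row.toNat col.toNat) (row - 1) col (0 + 1)).1 row
      (col - 1) (dfsA T f (markV v row.toNat col.toNat) (row - 1) col (0 + 1)).2).2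
  have t4 := dfsA_size_le T f
    (dfsA T f (dfsA T f (dfsA T f (markV v row.toNat col.toNat) (row - 1) col (0 + 1)).1
      row (col - 1)
      (dfsA T f (markV v row.toNat col.toNat) (row - 1) col (0 + 1)).2).1 row (col + 1)
      (dfsA T f (dfsA T f (markV v row.toNat col.toNat) (row - 1) col (0 + 1)).1 row
        (col - 1)
        (dfsA T f (markV v row.toNat col.toNat) (row - 1) col (0 + 1)).2).2).1
    (row + 1) col
    (dfsA T f (dfsA T f (dfsA T f (markV v row.toNat col.toNat) (row - 1) col (0 + 1)).1
      row (col - 1)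
      (dfsA T f (markV v row.toNat col.toNat) (row - 1) col (0 + 1)).2).1 row (col + 1)
      (dfsA T f (dfsA T f (markV v row.toNat col.toNat) (row - 1) col (0 + 1)).1 row
        (col - 1)
        (dfsA T f (markV v row.toNat col.toNat) (row - 1) col (0 + 1)).2).2).2
  omega

-- floodB on an empty stack returns, whatever the fuel
theorem floodB_nil (T : List (List String)) (f : Nat) (v : List (List Bool)) (s : Int) :
    floodB T f v [] s = (v, s) := by
  cases f <;> rfl

-- any two sufficient fuels give the same floodB result
theorem floodB_fuel (T : List (List String)) : ∀ (f f' : Nat) (v : List (List Bool))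
    (stack : List (Int × Int)) (size : Int), InvV T v →
    4 * countFalse v + stack.length ≤ f → 4 * countFalse v + stack.length ≤ f' →
    floodB T f v stack size = floodB T f' v stack size := by
  intro f
  induction f with
  | zero =>
    intro f' v stack size hv hf hf'
    cases stack with
    | nil => rw [floodB_nil, floodB_nil]
    | cons p rest => simp at hf
  | succ f ih =>
    intro f' v stack size hv hf hf'
    cases stack with
    | nil => rw [floodB_nil, floodB_nil]
    | cons p rest =>
      obtain ⟨r, c⟩ := p
      cases f' with
      | zero => simp at hf'
      | succ f' =>
        rw [floodB, floodB]
        by_cases h : badCell T v r c = true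
        · have hng : ¬ (0 ≤ r ∧ r < (T.length : Int) ∧ 0 ≤ c ∧ c < (T.length : Int) ∧
              ((T.getD r.toNat []).getD c.toNat "") ≠ "L" ∧
              ((v.getD r.toNat []).getD c.toNat false) = false) :=
            fun hg => (good_iff T v r c).mp hg h
          rw [if_neg hng, if_neg hng]
          exact ih f' v rest size hv (by simp only [List.length_cons] at hf; omega)
            (by simp only [List.length_cons] at hf'; omega)
        · have hg := (good_iff T v r c).mpr h
          rw [if_pos hg, if_pos hg, seeMark_eq_markV]
          have hm := good_mark_lt T v r c hv h
          exact ih f' (markV v r.toNat c.toNat) _ (size + 1)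
            (invV_mark T v r.toNat c.toNat hv)
            (by simp only [List.length_cons] at hf ⊢; omega)
            (by simp only [List.length_cons] at hf' ⊢; omega)

-- the key simulation: popping one cell and looping equals one dfsA call, then the loop
theorem floodB_dfsA (T : List (List String)) (k : Nat) :
    ∀ (v : List (List Bool)), InvV T v → countFalse v ≤ k →
    ∀ (r c : Int) (rest : List (Int × Int)) (size : Int) (fB : Nat),
      4 * countFalse v + rest.length + 2 ≤ fB →
      floodB T fB v ((r, c) :: rest) size =
        floodB T fB (dfsA T (countFalse v + 1) v r c size).1 rest
          (dfsA T (countFalse v + 1) v r c size).2 := by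
  induction k with
  | zero =>
    intro v hv hk r c rest size fB hfB
    cases fB with
    | zero => omega
    | succ g =>
      by_cases h : badCell T v r c = true
      · rw [floodB, dfsA, if_pos h]
        have hng : ¬ (0 ≤ r ∧ r < (T.length : Int) ∧ 0 ≤ c ∧ c < (T.length : Int) ∧
            ((T.getD r.toNat []).getD c.toNat "") ≠ "L" ∧
            ((v.getD r.toNat []).getD c.toNat false) = false) :=
          fun hg => (good_iff T v r c).mp hg h
        rw [if_neg hng]
        exact floodB_fuel T g (g + 1) v rest size hv (by omega) (by omega)
      · exact absurd (good_mark_lt T v r c hv h) (by omega)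
  | succ k ih =>
    intro v hv hk r c rest size fB hfB
    cases fB with
    | zero => omega
    | succ g =>
      by_cases h : badCell T v r c = true
      · rw [floodB, dfsA, if_pos h]
        have hng : ¬ (0 ≤ r ∧ r < (T.length : Int) ∧ 0 ≤ c ∧ c < (T.length : Int) ∧
            ((T.getD r.toNat []).getD c.toNat "") ≠ "L" ∧
            ((v.getD r.toNat []).getD c.toNat false) = false) :=
          fun hg => (good_iff T v r c).mp hg h
        rw [if_neg hng]
        exact floodB_fuel T g (g + 1) v rest size hv (by omega) (by omega)
      · have hg := (good_iff T v r c).mpr h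
        have hm := good_mark_lt T v r c hv h
        have hv1 := invV_mark T v r.toNat c.toNat hv
        rw [floodB, if_pos hg, seeMark_eq_markV]
        -- process the four pushed neighbours one by one
        rw [ih (markV v r.toNat c.toNat) hv1 (by omega) (r - 1) c _ (size + 1) g
          (by simp; omega)]
        rw [dfsA_fuel T (countFalse (markV v r.toNat c.toNat) + 1) (countFalse v)
          (markV v r.toNat c.toNat) (r - 1) c (size + 1) hv1 (by omega) (by omega)]
        obtain ⟨i1, l1⟩ := dfsA_inv T (countFalse v) (markV v r.toNat c.toNat)
          (r - 1) c (size + 1) hv1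
        rw [ih (dfsA T (countFalse v) (markV v r.toNat c.toNat) (r - 1) c (size + 1)).1
          i1 (by omega) r (c - 1) _
          (dfsA T (countFalse v) (markV v r.toNat c.toNat) (r - 1) c (size + 1)).2 g
          (by simp; omega)]
        rw [dfsA_fuel T
          (countFalse (dfsA T (countFalse v) (markV v r.toNat c.toNat) (r - 1) c
            (size + 1)).1 + 1) (countFalse v)
          (dfsA T (countFalse v) (markV v r.toNat c.toNat) (r - 1) c (size + 1)).1
          r (c - 1)
          (dfsA T (countFalse v) (markV v r.toNat c.toNat) (r - 1) c (size + 1)).2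
          i1 (by omega) (by omega)]
        obtain ⟨i2, l2⟩ := dfsA_inv T (countFalse v)
          (dfsA T (countFalse v) (markV v r.toNat c.toNat) (r - 1) c (size + 1)).1
          r (c - 1)
          (dfsA T (countFalse v) (markV v r.toNat c.toNat) (r - 1) c (size + 1)).2 i1
        rw [ih (dfsA T (countFalse v)
            (dfsA T (countFalse v) (markV v r.toNat c.toNat) (r - 1) c (size + 1)).1
            r (c - 1)
            (dfsA T (countFalse v) (markV v r.toNat c.toNat) (r - 1) c (size + 1)).2).1
          i2 (by omega) r (c + 1) _
          (dfsA T (countFalse v)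
            (dfsA T (countFalse v) (markV v r.toNat c.toNat) (r - 1) c (size + 1)).1
            r (c - 1)
            (dfsA T (countFalse v) (markV v r.toNat c.toNat) (r - 1) c (size + 1)).2).2 g
          (by simp; omega)]
        rw [dfsA_fuel T _ (countFalse v) _ r (c + 1) _ i2 (by omega) (by omega)]
        obtain ⟨i3, l3⟩ := dfsA_inv T (countFalse v)
          (dfsA T (countFalse v)
            (dfsA T (countFalse v) (markV v r.toNat c.toNat) (r - 1) c (size + 1)).1
            r (c - 1)
            (dfsA T (countFalse v) (markV v r.toNat c.toNat) (r - 1) c (size + 1)).2).1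
          r (c + 1)
          (dfsA T (countFalse v)
            (dfsA T (countFalse v) (markV v r.toNat c.toNat) (r - 1) c (size + 1)).1
            r (c - 1)
            (dfsA T (countFalse v) (markV v r.toNat c.toNat) (r - 1) c (size + 1)).2).2 i2
        rw [ih _ i3 (by omega) (r + 1) c rest _ g (by omega)]
        rw [dfsA_fuel T _ (countFalse v) _ (r + 1) c _ i3 (by omega) (by omega)]
        obtain ⟨i4, l4⟩ := dfsA_inv T (countFalse v)
          (dfsA T (countFalse v)
            (dfsA T (countFalse v)
              (dfsA T (countFalse v) (markV v r.toNat c.toNat) (r - 1) c (size + 1)).1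
              r (c - 1)
              (dfsA T (countFalse v) (markV v r.toNat c.toNat) (r - 1) c (size + 1)).2).1
            r (c + 1)
            (dfsA T (countFalse v)
              (dfsA T (countFalse v) (markV v r.toNat c.toNat) (r - 1) c (size + 1)).1
              r (c - 1)
              (dfsA T (countFalse v) (markV v r.toNat c.toNat) (r - 1) c
                (size + 1)).2).2).1
          (r + 1) c
          (dfsA T (countFalse v)
            (dfsA T (countFalse v)
              (dfsA T (countFalse v) (markV v r.toNat c.toNat) (r - 1) c (size + 1)).1
              r (c - 1)
              (dfsA T (countFalse v) (markV v r.toNat c.toNat) (r - 1) c (size + 1)).2).1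
            r (c + 1)
            (dfsA T (countFalse v)
              (dfsA T (countFalse v) (markV v r.toNat c.toNat) (r - 1) c (size + 1)).1
              r (c - 1)
              (dfsA T (countFalse v) (markV v r.toNat c.toNat) (r - 1) c
                (size + 1)).2).2).2 i3
        rw [dfsA, if_neg h]
        exact floodB_fuel T g (g + 1) _ rest _ i4 (by omega) (by omega)

-- running the stack loop on a single start cell is exactly one dfsA call
theorem floodB_run (T : List (List String)) (v : List (List Bool)) (hv : InvV T v)
    (i j : Int) :
    floodB T (4 * countFalse v + 2) v [(i, j)] 0 = dfsA T (countFalse v + 1) v i j 0 := by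
  rw [floodB_dfsA T (countFalse v) v hv (le_refl _) i j [] 0 (4 * countFalse v + 2)
    (by simp)]
  rw [floodB_nil]

-- fold two different state machines over the same list, keeping a relation
theorem foldl_rel {σ τ α : Type} (l : List α) (R : σ → τ → Prop)
    (f : σ → α → σ) (g : τ → α → τ)
    (h : ∀ s t a, a ∈ l → R s t → R (f s a) (g t a)) :
    ∀ s t, R s t → R (l.foldl f s) (l.foldl g t) := by
  induction l with
  | nil => intro s t hst; exact hst
  | cons a tl ih =>
    intro s t hst
    simp only [List.foldl_cons]
    exact ih (fun s t b hb => h s t b (List.mem_cons_of_mem a hb)) _ _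
      (h s t a List.mem_cons_self hst)

-- the relation between A's state (visited, count, max) and B's state (seen, sizes)
def RelAB (T : List (List String)) (sA : List (List Bool) × Int × Int)
    (sB : List (List Bool) × List Int) : Prop :=
  sA.1 = sB.1 ∧ InvV T sA.1 ∧ sA.2.1 = sB.2.length ∧
    sA.2.2 = sB.2.foldl (fun a s => max s a) 0 ∧ ∀ s ∈ sB.2, 1 ≤ s

theorem foldl_max_comm (t : List Int) : ∀ x : Int,
    t.foldl (fun a s => max s a) x = t.foldl max x := by
  induction t with
  | nil => intro x; rfl
  | cons a tl ih => intro x; simp only [List.foldl_cons, ih, max_comm]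

-- one cell of the scan preserves the relation
theorem stepAB (T : List (List String)) (i j : Nat) (hi : i < T.length) (hj : j < T.length)
    (sA : List (List Bool) × Int × Int) (sB : List (List Bool) × List Int)
    (hR : RelAB T sA sB) :
    RelAB T (lakesStepA T sA i j)
      (if ((T.getD i []).getD j "") = "W" ∧ ¬ ((sB.1.getD i []).getD j false) = true then
        let d := floodB T (4 * unseenCount sB.1 + 2) sB.1
          [(((i : Nat) : Int), ((j : Nat) : Int))] 0
        (d.1, sB.2 ++ [d.2])
      else sB) := by
  obtain ⟨hv, hinv, hc, hm, hones⟩ := hR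
  unfold lakesStepA
  rw [← hv]
  by_cases hcond : ((T.getD i []).getD j "") = "W" ∧ ((sA.1.getD i []).getD j false) = false
  · rw [if_pos hcond, if_pos (by simpa using hcond)]
    have hgood : ¬ badCell T sA.1 ((i : Nat) : Int) ((j : Nat) : Int) = true := by
      rw [← good_iff]
      refine ⟨by omega, by omega, by omega, by omega, ?_, by simpa using hcond.2⟩
      simp only [Int.toNat_natCast]
      rw [hcond.1]; decide
    have hB := floodB_run T sA.1 hinv ((i : Nat) : Int) ((j : Nat) : Int)
    rw [unseenCount_eq, hB]
    obtain ⟨iD, _⟩ := dfsA_inv T (countFalse sA.1 + 1) sA.1 ((i : Nat) : Int)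
      ((j : Nat) : Int) 0 hinv
    have hone : 1 ≤ (dfsA T (countFalse sA.1 + 1) sA.1 ((i : Nat) : Int) ((j : Nat) : Int) 0).2 :=
      dfsA_good_one T (countFalse sA.1) sA.1 _ _ hgood
    refine ⟨rfl, iD, ?_, ?_, ?_⟩
    · show sA.2.1 + 1 = ((sB.2 ++ [(dfsA T (countFalse sA.1 + 1) sA.1 ((i : Nat) : Int) ((j : Nat) : Int) 0).2]).length : Int)
      simp [hc]
    · show max (dfsA T (countFalse sA.1 + 1) sA.1 ((i : Nat) : Int) ((j : Nat) : Int) 0).2 sA.2.2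
        = (sB.2 ++ [(dfsA T (countFalse sA.1 + 1) sA.1 ((i : Nat) : Int) ((j : Nat) : Int) 0).2]).foldl (fun a s => max s a) 0
      rw [List.foldl_append, ← hm]
      simp
    · intro s hs
      have hs' : s ∈ sB.2 ++ [(dfsA T (countFalse sA.1 + 1) sA.1 ((i : Nat) : Int) ((j : Nat) : Int) 0).2] := hs
      rcases List.mem_append.mp hs' with h | h
      · exact hones s h
      · rw [List.mem_singleton.mp h]; exact hone
  · rw [if_neg hcond, if_neg (by simpa using hcond)]
    exact ⟨hv, hinv, hc, hm, hones⟩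

-- the final aggregation: A's running max equals Python's max(sizes, default=0)
theorem final_max (sizes : List Int) (hones : ∀ s ∈ sizes, 1 ≤ s) :
    sizes.foldl (fun a s => max s a) 0 = PySem.List.maxD sizes (fun x => x) 0 := by
  cases sizes with
  | nil => rfl
  | cons x t =>
    have hx : (1 : Int) ≤ x := hones x List.mem_cons_self
    simp only [List.foldl_cons, foldl_max_comm]
    have : max x 0 = x := by omega
    rw [this, PySem.List.maxD, PySem.List.max?_id_cons]
    rfl

-- ===== VERDICT (by name: the statement is the Claim_ definition above) =====
theorem lakes_spec : Claim_equal_lakes := by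
  intro T _ _
  unfold Spec_lakes
  have inner := fun (i : Nat) (hi : i < T.length) =>
    foldl_rel (List.range T.length) (RelAB T)
      (fun st j => lakesStepA T st i j)
      (fun st j =>
        if ((T.getD i []).getD j "") = "W" ∧ ¬ ((st.1.getD i []).getD j false) = true then
          let d := floodB T (4 * unseenCount st.1 + 2) st.1
            [(((i : Nat) : Int), ((j : Nat) : Int))] 0
          (d.1, st.2 ++ [d.2])
        else st)
      (fun s t j hj => stepAB T i j hi (List.mem_range.mp hj) s t)
  have main := foldl_rel (List.range T.length) (RelAB T)
    (fun st i => (List.range T.length).foldl (fun st j => lakesStepA T st i j) st)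
    (fun st i => (List.range T.length).foldl
      (fun st j =>
        if ((T.getD i []).getD j "") = "W" ∧ ¬ ((st.1.getD i []).getD j false) = true then
          let d := floodB T (4 * unseenCount st.1 + 2) st.1
            [(((i : Nat) : Int), ((j : Nat) : Int))] 0
          (d.1, st.2 ++ [d.2])
        else st) st)
    (fun s t i hi => inner i (List.mem_range.mp hi) s t)
    (List.replicate T.length (List.replicate T.length false), 0, 0)
    (List.replicate T.length (List.replicate T.length false), ([] : List Int))
    ⟨rfl, invV_init T, rfl, rfl, by intro s hs; simp at hs⟩
  obtain ⟨_, _, hc, hm, hones⟩ := main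
  show (((List.range T.length).foldl
      (fun st i => (List.range T.length).foldl (fun st j => lakesStepA T st i j) st)
      (List.replicate T.length (List.replicate T.length false), 0, 0)).2.1,
    ((List.range T.length).foldl
      (fun st i => (List.range T.length).foldl (fun st j => lakesStepA T st i j) st)
      (List.replicate T.length (List.replicate T.length false), 0, 0)).2.2) = lakes_alt T
  rw [hc, hm, final_max _ hones]
  rfl
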